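-- pv_equiv track=rewrite | github.com/asamarka-625/CSTargerHelper | telegram_bot/keyboards/user_keyboard.py | create_text_on_page
-- ===== SOURCE A (Python) =====
-- from typing import Sequence, Optional, List
--
-- def create_text_on_page(
--     obj: Sequence,
--     offset: int,
--     text_for_exists: str,
--     text_for_no_exists: str
-- ) -> str:
--     text = f"{text_for_exists}\n\n"
--     if obj:
--         for i in range(0, len(obj), 2):
--             id_num = i + offset
--             if (i + 1) < len(obj):
--                 text += f"{id_num}) {obj[i][1].upper()}           {id_num+1}) {obj[i+1][1].upper()}\n"
--             else:
--                 text += f"{id_num}) {obj[i][1].upper()}"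
--
--         return text
--
--     else:
--         return text_for_no_exists
-- ===== SOURCE B (Python) =====
-- def _chunks(rows, k):
--     if not rows:
--         return ""
--     if len(rows) == 1:
--         return f"{k}) {rows[0][1].upper()}"
--     head = f"{k}) {rows[0][1].upper()}           {k+1}) {rows[1][1].upper()}\n"
--     return head + _chunks(rows[2:], k + 2)
--
-- def create_text_on_page(obj, offset, text_for_exists, text_for_no_exists):
--     if not obj:
--         return text_for_no_exists
--     return f"{text_for_exists}\n\n" + _chunks(list(obj), offset)
-- ===== Notes on version B (the rewrite author's own statement) =====
-- stated objective: alternative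
-- what changed: Replaces A's index loop over range(0, len(obj), 2) with global indexing and an in-loop boundary test by a recursive helper that consumes the list two rows at a time (head pattern / rows[2:]), so no indices into the whole list and no range object are needed.
-- outside the precondition, e.g. on create_text_on_page([['only']], 0, 'H', 'N'): A raises IndexError, B raises IndexError
import Mathlib
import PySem

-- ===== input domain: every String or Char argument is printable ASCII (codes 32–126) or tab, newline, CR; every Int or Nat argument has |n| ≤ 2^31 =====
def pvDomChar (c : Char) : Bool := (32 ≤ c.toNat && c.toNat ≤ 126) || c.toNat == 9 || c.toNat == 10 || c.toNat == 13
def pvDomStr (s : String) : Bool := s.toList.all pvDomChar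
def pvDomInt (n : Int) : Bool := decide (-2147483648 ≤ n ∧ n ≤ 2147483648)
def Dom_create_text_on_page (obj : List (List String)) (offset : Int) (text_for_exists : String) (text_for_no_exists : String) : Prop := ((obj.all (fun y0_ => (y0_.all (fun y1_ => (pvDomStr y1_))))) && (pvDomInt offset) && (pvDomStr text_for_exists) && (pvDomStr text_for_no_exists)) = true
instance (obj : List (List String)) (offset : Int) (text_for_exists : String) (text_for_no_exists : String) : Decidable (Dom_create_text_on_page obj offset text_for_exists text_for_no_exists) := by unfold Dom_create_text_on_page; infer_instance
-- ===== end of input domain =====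

-- B differs from A only in decomposition (recursive pair-consumption vs index loop over range); objective: alternative.

-- ===== PORT A =====
-- A-side helper: the string appended in one iteration of A's loop (the f-string of each branch).
def lineA (obj : List (List String)) (offset : Int) (i : Int) : String :=
  let id_num := i + offset
  if i + 1 < (obj.length : Int) then
    PySem.Int.toStr id_num ++ ") " ++ PySem.Str.upper (PySem.List.pyGetD (PySem.List.pyGetD obj i []) 1 "") ++ "           " ++ PySem.Int.toStr (id_num + 1) ++ ") " ++ PySem.Str.upper (PySem.List.pyGetD (PySem.List.pyGetD obj (i + 1) []) 1 "") ++ "\n"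
  else
    PySem.Int.toStr id_num ++ ") " ++ PySem.Str.upper (PySem.List.pyGetD (PySem.List.pyGetD obj i []) 1 "")

def create_text_on_page (obj : List (List String)) (offset : Int) (text_for_exists : String) (text_for_no_exists : String) : String :=
  let text := text_for_exists ++ "\n\n"
  if obj ≠ [] then
    (PySem.List.pyRange 0 (obj.length : Int) 2).foldl (fun text i => text ++ lineA obj offset i) text
  else
    text_for_no_exists

-- ===== PORT B =====
-- port of Source B's _chunks: pattern match = Source B's emptiness / len==1 tests; rest = rows[2:]
def bChunks : List (List String) → Int → String
  | [], _ => ""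
  | [x], k => PySem.Int.toStr k ++ ") " ++ PySem.Str.upper (PySem.List.pyGetD x 1 "")
  | x :: y :: rest, k =>
    (PySem.Int.toStr k ++ ") " ++ PySem.Str.upper (PySem.List.pyGetD x 1 "") ++ "           " ++ PySem.Int.toStr (k + 1) ++ ") " ++ PySem.Str.upper (PySem.List.pyGetD y 1 "") ++ "\n")
      ++ bChunks rest (k + 2)

def create_text_on_page_alt (obj : List (List String)) (offset : Int) (text_for_exists : String) (text_for_no_exists : String) : String :=
  if obj = [] then
    text_for_no_exists
  else
    (text_for_exists ++ "\n\n") ++ bChunks obj offset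

-- ===== PRECONDITION & SPEC =====
-- Pre_ excludes exactly the inputs where Python A raises IndexError: a row with fewer than 2 items (A reads row[1]).
def Pre_create_text_on_page (obj : List (List String)) (offset : Int) (text_for_exists : String) (text_for_no_exists : String) : Prop :=
  ∀ row ∈ obj, 2 ≤ row.length
instance (obj : List (List String)) (offset : Int) (text_for_exists : String) (text_for_no_exists : String) : Decidable (Pre_create_text_on_page obj offset text_for_exists text_for_no_exists) := by unfold Pre_create_text_on_page; infer_instance

def pvWitness_create_text_on_page : List (List String) × Int × String × String := ([["a", "b"], ["c", "d"], ["e", "f"]], 1, "Items:", "No items")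

def Spec_create_text_on_page (obj : List (List String)) (offset : Int) (text_for_exists : String) (text_for_no_exists : String) (out : String) : Prop := out = create_text_on_page_alt obj offset text_for_exists text_for_no_exists
instance (obj : List (List String)) (offset : Int) (text_for_exists : String) (text_for_no_exists : String) (out : String) : Decidable (Spec_create_text_on_page obj offset text_for_exists text_for_no_exists out) := by unfold Spec_create_text_on_page; infer_instance

-- ===== CLAIM (what is proved, stated in full; the proofs are below) =====
def Claim_equal_create_text_on_page : Prop := ∀ (obj : List (List String)) (offset : Int) (text_for_exists : String) (text_for_no_exists : String), Dom_create_text_on_page obj offset text_for_exists text_for_no_exists → Pre_create_text_on_page obj offset text_for_exists text_for_no_exists → Spec_create_text_on_page obj offset text_for_exists text_for_no_exists (create_text_on_page obj offset text_for_exists text_for_no_exists)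

-- ===== LEMMAS AND PROOFS =====

-- concatenation of a list of strings, the shape A's loop produces
def sconcat : List String → String
  | [] => ""
  | s :: rest => s ++ sconcat rest

theorem foldl_str_append {α : Type} (h : α → String) (l : List α) (t0 : String) :
    l.foldl (fun t i => t ++ h i) t0 = t0 ++ sconcat (l.map h) := by
  induction l generalizing t0 with
  | nil => simp [sconcat]
  | cons a l ih => simp [sconcat, ih, String.append_assoc]

theorem pyRange_two (len : Nat) :
    PySem.List.pyRange 0 (len : Int) 2 = (List.range ((len + 1) / 2)).map (fun k => ((2 * k : Nat) : Int)) := by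
  rw [PySem.List.pyRange_of_pos 0 (len : Int) (by norm_num)]
  have hcnt : (if (0 : Int) < (len : Int) then (((len : Int) - 0 + 2 - 1) / 2).toNat else 0) = (len + 1) / 2 := by
    split_ifs with h
    · omega
    · omega
  rw [hcnt]
  apply List.map_congr_left
  intro k _
  push_cast
  ring

theorem lineA_shift (x y : List String) (rest : List (List String)) (offset : Int) (k : Nat) :
    lineA (x :: y :: rest) offset ((2 * (k + 1) : Nat) : Int) = lineA rest (offset + 2) ((2 * k : Nat) : Int) := by
  have hc : (((2 * (k + 1) : Nat) : Int) + 1 < ((x :: y :: rest).length : Int)) ↔ (((2 * k : Nat) : Int) + 1 < (rest.length : Int)) := by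
    simp only [List.length_cons]
    push_cast
    omega
  have hid : ((2 * (k + 1) : Nat) : Int) + offset = ((2 * k : Nat) : Int) + (offset + 2) := by push_cast; ring
  have hg1 : PySem.List.pyGetD (x :: y :: rest) ((2 * (k + 1) : Nat) : Int) ([] : List String) = PySem.List.pyGetD rest ((2 * k : Nat) : Int) ([] : List String) := by
    rw [PySem.List.pyGetD_natCast, PySem.List.pyGetD_natCast]
    show List.getD (x :: y :: rest) (2 * k + 2) [] = List.getD rest (2 * k) []
    simp [List.getD]
  have hg2 : PySem.List.pyGetD (x :: y :: rest) (((2 * (k + 1) : Nat) : Int) + 1) ([] : List String) = PySem.List.pyGetD rest (((2 * k : Nat) : Int) + 1) ([] : List String) := by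
    have e1 : (((2 * (k + 1) : Nat) : Int) + 1) = ((2 * k + 3 : Nat) : Int) := by push_cast; ring
    have e2 : (((2 * k : Nat) : Int) + 1) = ((2 * k + 1 : Nat) : Int) := by push_cast; ring
    rw [e1, e2, PySem.List.pyGetD_natCast, PySem.List.pyGetD_natCast]
    show List.getD (x :: y :: rest) (2 * k + 3) [] = List.getD rest (2 * k + 1) []
    simp [List.getD]
  simp only [lineA, hc, hid, hg1, hg2]

theorem chunks_eq (obj : List (List String)) (offset : Int) :
    sconcat ((List.range ((obj.length + 1) / 2)).map (fun k => lineA obj offset ((2 * k : Nat) : Int))) = bChunks obj offset := by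
  induction obj, offset using bChunks.induct with
  | case1 offset => simp [sconcat, bChunks]
  | case2 x offset =>
    norm_num
    simp [lineA, bChunks, PySem.List.pyGetD_zero_cons, sconcat]
  | case3 x y rest offset ih =>
    have hm : ((x :: y :: rest).length + 1) / 2 = (rest.length + 1) / 2 + 1 := by
      simp only [List.length_cons]; omega
    rw [hm, List.range_succ_eq_map, List.map_cons, List.map_map]
    have hmaps : (List.map ((fun k => lineA (x :: y :: rest) offset ((2 * k : Nat) : Int)) ∘ Nat.succ) (List.range ((rest.length + 1) / 2))) = (List.range ((rest.length + 1) / 2)).map (fun k => lineA rest (offset + 2) ((2 * k : Nat) : Int)) := by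
      apply List.map_congr_left
      intro k _
      show lineA (x :: y :: rest) offset ((2 * (k + 1) : Nat) : Int) = _
      exact lineA_shift x y rest offset k
    rw [hmaps]
    show lineA (x :: y :: rest) offset ((2 * 0 : Nat) : Int) ++ _ = _
    rw [ih]
    have h0 : ((2 * 0 : Nat) : Int) = 0 := by norm_num
    rw [h0]
    have hline : lineA (x :: y :: rest) offset 0 = PySem.Int.toStr (offset) ++ ") " ++ PySem.Str.upper (PySem.List.pyGetD x 1 "") ++ "           " ++ PySem.Int.toStr (offset + 1) ++ ") " ++ PySem.Str.upper (PySem.List.pyGetD y 1 "") ++ "\n" := by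
      have hy : PySem.List.pyGetD (x :: y :: rest) (1 : Int) ([] : List String) = y := by
        rw [show (1 : Int) = ((1 : Nat) : Int) by norm_num, PySem.List.pyGetD_natCast]
        rfl
      simp [lineA, PySem.List.pyGetD_zero_cons, hy]
    rw [hline]
    simp [bChunks, String.append_assoc]

-- ===== VERDICT (by name: the statement is the Claim_ definition above) =====
theorem create_text_on_page_spec : Claim_equal_create_text_on_page := by
  intro obj offset tfe tfn _hdom _hpre
  unfold Spec_create_text_on_page create_text_on_page create_text_on_page_alt
  by_cases hobj : obj = []
  · simp [hobj]
  · simp only [hobj, ne_eq, not_false_eq_true, if_true]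
    rw [pyRange_two obj.length, List.foldl_map, foldl_str_append, chunks_eq]
    simp
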